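-- pv_equiv track=rewrite | github.com/dbsrl1026/boj-solve | hw.py | dfs
-- ===== SOURCE A (Python) =====
-- def dfs(graph, node, visited):
--     visited[node] = True
--     max_distance = 0
--
--     for neighbor, weight in graph[node]:
--         if not visited[neighbor]:
--             distance = dfs(graph, neighbor, visited) + weight
--             if distance > max_distance:
--                 max_distance = distance
--
--     return max_distance
-- ===== SOURCE B (Python) =====
-- def dfs(graph, node, visited):
--     # Iterative DFS with an explicit stack of frames instead of recursion.
--     # Frame = [node, next neighbor index, running max distance, weight of edge to parent].
--     # Marks visited at push time, which is exactly when A's recursion marks on entry,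
--     # so the traversal order and the mutation of `visited` are identical to A's.
--     visited[node] = True
--     stack = [[node, 0, 0, 0]]
--     while True:
--         u, i, m, w = stack[-1]
--         adj = graph[u]
--         if i < len(adj):
--             stack[-1][1] = i + 1
--             nb, wt = adj[i]
--             if not visited[nb]:
--                 visited[nb] = True
--                 stack.append([nb, 0, 0, wt])
--         else:
--             stack.pop()
--             d = m + w
--             if not stack:
--                 return d
--             if d > stack[-1][2]:
--                 stack[-1][2] = d
-- ===== Notes on version B (the rewrite author's own statement) =====
-- stated objective: alternative
-- what changed: The recursive DFS is replaced by an iterative stack machine: a while-loop over explicit frames (node, next-neighbor index, running max, edge weight to parent) that marks nodes at push time and folds a finished child's distance into its parent's running max when the frame is popped, instead of Python's call stack doing that implicitly.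
import Mathlib
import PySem

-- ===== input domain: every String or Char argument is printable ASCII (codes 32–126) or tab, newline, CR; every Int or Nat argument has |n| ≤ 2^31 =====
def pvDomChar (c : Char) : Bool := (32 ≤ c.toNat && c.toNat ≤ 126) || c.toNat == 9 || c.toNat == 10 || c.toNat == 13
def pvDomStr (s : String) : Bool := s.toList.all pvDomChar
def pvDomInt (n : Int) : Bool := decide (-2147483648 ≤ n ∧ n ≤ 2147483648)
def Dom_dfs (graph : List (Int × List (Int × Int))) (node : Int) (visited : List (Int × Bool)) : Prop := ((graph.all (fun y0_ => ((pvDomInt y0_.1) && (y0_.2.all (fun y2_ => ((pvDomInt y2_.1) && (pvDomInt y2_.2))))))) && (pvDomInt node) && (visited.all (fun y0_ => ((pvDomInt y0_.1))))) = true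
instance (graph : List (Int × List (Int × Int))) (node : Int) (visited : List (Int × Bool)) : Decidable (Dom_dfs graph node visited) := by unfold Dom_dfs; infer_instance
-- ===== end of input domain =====

-- A = recursive DFS returning the max weighted distance; B = the same traversal run
-- ITERATIVELY on an explicit stack of frames (node, next-neighbor index, running max,
-- edge weight to parent); objective: alternative decomposition (recursion -> stack machine).
-- Python A and B both mutate `visited` (identically); the equivalence proved here is
-- about the RETURN value only.


-- ===== PORT A =====
-- loop body of A's `for neighbor, weight in graph[node]`, with `r` the recursive call:
-- `if not visited[neighbor]: distance = dfs(...) + weight; if distance > max_distance: ...`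
-- (a missing `visited[neighbor]` key would be a KeyError; excluded by Pre_dfs, default irrelevant)
def stepA (r : Int → PySem.Dict Int Bool → Int × PySem.Dict Int Bool)
    (acc : Int × PySem.Dict Int Bool) (p : Int × Int) : Int × PySem.Dict Int Bool :=
  if acc.2.getD p.1 true then acc
  else
    let rr := r p.1 acc.2
    let distance := rr.1 + p.2
    (if distance > acc.1 then distance else acc.1, rr.2)

-- A's recursion, threading the mutated `visited` dict and guarded by fuel; fuel
-- `visited.length + 1` always suffices (each recursive call permanently flips one
-- initially-False entry to True), so the fuel-0 branch is never reached on Pre_ inputs.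
def dfsGoA (graph : PySem.Dict Int (List (Int × Int))) :
    Nat → Int → PySem.Dict Int Bool → Int × PySem.Dict Int Bool
  | 0, _, visited => (0, visited)
  | fuel + 1, node, visited =>
    let v := visited.insert node true                  -- visited[node] = True
    let adj := (graph.get? node).getD []               -- graph[node]; KeyError excluded by Pre_dfs
    adj.foldl (stepA (dfsGoA graph fuel)) (0, v)       -- max_distance = 0; the for-loop

def dfs (graph : List (Int × List (Int × Int))) (node : Int) (visited : List (Int × Bool)) : Int :=
  (dfsGoA (PySem.Dict.mk graph) (visited.length + 1) node (PySem.Dict.mk visited)).1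

-- ===== PORT B =====
-- B is a stack machine; its `while True` loop is guarded by fuel. `fuelB (adjSum graph)
-- (visited.length + 1)` machine steps always suffice (the proof of dfs_eq_alt below shows
-- the machine finishes within this fuel via goC_cost_le), so the fuel-0 branch is never reached.
def adjSum (graph : List (Int × List (Int × Int))) : Nat :=
  graph.foldl (fun s p => s + p.2.length) 0

def fuelB (a : Nat) : Nat → Nat
  | 0 => 0
  | f + 1 => a * (fuelB a f + 1) + 1

-- one fuel unit = one iteration of B's `while True` loop; frame = (u, i, m, w)
def runB (graph : PySem.Dict Int (List (Int × Int))) :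
    Nat → List (Int × Nat × Int × Int) → PySem.Dict Int Bool → Int
  | 0, _, _ => 0
  | _ + 1, [], _ => 0
  | fuel + 1, (u, i, m, w) :: S, v =>
    let adj := (graph.get? u).getD []                  -- adj = graph[u]; KeyError excluded by Pre_dfs
    match adj[i]? with
    | some p =>                                        -- i < len(adj)
      if v.getD p.1 true then runB graph fuel ((u, i + 1, m, w) :: S) v
      else runB graph fuel ((p.1, 0, 0, p.2) :: (u, i + 1, m, w) :: S) (v.insert p.1 true)
    | none =>                                          -- pop; d = m + w
      let d := m + w
      match S with
      | [] => d
      | (pu, pi, pm, pw) :: S' =>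
        runB graph fuel ((pu, pi, if d > pm then d else pm, pw) :: S') v

def dfs_alt (graph : List (Int × List (Int × Int))) (node : Int) (visited : List (Int × Bool)) : Int :=
  runB (PySem.Dict.mk graph) (fuelB (adjSum graph) (visited.length + 1))
    [(node, 0, 0, 0)] ((PySem.Dict.mk visited).insert node true)

-- ===== PRECONDITION & SPEC =====
-- helpers for Pre_dfs (membership/reachability only; they compute no output of either program)
def pvAdjOf (graph : List (Int × List (Int × Int))) (u : Int) : List (Int × Int) :=
  ((graph.find? (fun p => p.1 == u)).map (fun p => p.2)).getD []
def pvIsFalse (visited : List (Int × Bool)) (nb : Int) : Bool :=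
  (visited.find? (fun p => p.1 == nb)).map (fun p => p.2) == some false
def pvReachStep (graph : List (Int × List (Int × Int))) (visited : List (Int × Bool)) (S : List Int) : List Int :=
  S ++ ((S.flatMap (fun u => (pvAdjOf graph u).map (fun q => q.1))).filter
          (fun nb => pvIsFalse visited nb && !S.contains nb))
-- nodes reachable from `node` stepping only into initially-unvisited nodes: exactly the
-- nodes A's recursion enters (len(visited)+1 closure rounds are enough: each round that
-- changes the set adds an initially-False key, and there are at most len(visited) of them)
def pvReach (graph : List (Int × List (Int × Int))) (visited : List (Int × Bool)) (node : Int) : List Int :=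
  (List.range (visited.length + 1)).foldl (fun S _ => pvReachStep graph visited S) [node]

-- Pre_dfs is exactly the no-KeyError condition: `node` is a key of graph, and every node A's
-- DFS enters (pvReach) is a key of graph with all its neighbors keys of visited (or = node,
-- which A marks on entry). Outside Pre_dfs the Python raises KeyError; nothing else is excluded.
def Pre_dfs (graph : List (Int × List (Int × Int))) (node : Int) (visited : List (Int × Bool)) : Prop :=
  graph.any (fun p => p.1 == node) = true ∧
  ∀ u ∈ pvReach graph visited node,
    graph.any (fun p => p.1 == u) = true ∧
    ∀ q ∈ pvAdjOf graph u, (visited.any (fun r => r.1 == q.1) = true ∨ q.1 = node)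
instance (graph : List (Int × List (Int × Int))) (node : Int) (visited : List (Int × Bool)) : Decidable (Pre_dfs graph node visited) := by unfold Pre_dfs; infer_instance

def pvWitness_dfs : (List (Int × List (Int × Int))) × Int × (List (Int × Bool)) :=
  ([(0, [(1, 2)]), (1, [(0, 3)])], 0, [(0, false), (1, false)])

def Spec_dfs (graph : List (Int × List (Int × Int))) (node : Int) (visited : List (Int × Bool)) (out : Int) : Prop := out = dfs_alt graph node visited
instance (graph : List (Int × List (Int × Int))) (node : Int) (visited : List (Int × Bool)) (out : Int) : Decidable (Spec_dfs graph node visited out) := by unfold Spec_dfs; infer_instance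

-- ===== CLAIM (what is proved, stated in full; the proofs are below) =====
def Claim_equal_dfs : Prop := ∀ (graph : List (Int × List (Int × Int))) (node : Int) (visited : List (Int × Bool)), Dom_dfs graph node visited → Pre_dfs graph node visited → Spec_dfs graph node visited (dfs graph node visited)

-- ===== LEMMAS AND PROOFS =====

-- `cf v` = number of dict entries still False: the measure that certifies both fuels
def cf (v : PySem.Dict Int Bool) : Nat := v.items.countP (fun p => p.2 == false)

-- instrumented copy of A's loop body / recursion: same values plus a step count
-- (steps = machine iterations B spends on the same work)
def stepC (r : Int → PySem.Dict Int Bool → (Int × PySem.Dict Int Bool) × Nat)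
    (acc : (Int × PySem.Dict Int Bool) × Nat) (p : Int × Int) : (Int × PySem.Dict Int Bool) × Nat :=
  if acc.1.2.getD p.1 true then (acc.1, acc.2 + 1)
  else
    let rr := r p.1 acc.1.2
    let distance := rr.1.1 + p.2
    ((if distance > acc.1.1 then distance else acc.1.1, rr.1.2), acc.2 + 1 + rr.2)

def goC (graph : PySem.Dict Int (List (Int × Int))) :
    Nat → Int → PySem.Dict Int Bool → (Int × PySem.Dict Int Bool) × Nat
  | 0, _, visited => ((0, visited), 0)
  | fuel + 1, node, visited =>
    let v := visited.insert node true
    let adj := (graph.get? node).getD []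
    let r := adj.foldl (stepC (goC graph fuel)) ((0, v), 0)
    (r.1, r.2 + 1)

-- what the machine does right after popping a finished frame with value d
def contPop (graph : PySem.Dict Int (List (Int × Int))) (fB : Nat)
    (S : List (Int × Nat × Int × Int)) (d : Int) (v : PySem.Dict Int Bool) : Int :=
  match S with
  | [] => d
  | (pu, pi, pm, pw) :: S' =>
    runB graph fB ((pu, pi, if d > pm then d else pm, pw) :: S') v

-- goC projects onto A's recursion
theorem foldC_fst (r : Int → PySem.Dict Int Bool → (Int × PySem.Dict Int Bool) × Nat)
    (l : List (Int × Int)) (m : Int) (v : PySem.Dict Int Bool) (c : Nat) :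
    (l.foldl (stepC r) ((m, v), c)).1 = l.foldl (stepA (fun n w => (r n w).1)) (m, v) := by
  induction l generalizing m v c with
  | nil => rfl
  | cons p t ih =>
    simp only [List.foldl_cons, stepC, stepA]
    by_cases h : v.getD p.1 true <;> simp [h, ih]

theorem goC_fst (graph : PySem.Dict Int (List (Int × Int))) (f : Nat) (u : Int)
    (v : PySem.Dict Int Bool) : (goC graph f u v).1 = dfsGoA graph f u v := by
  induction f generalizing u v with
  | zero => rfl
  | succ f ih =>
    have hr : (fun n w => (goC graph f n w).1) = dfsGoA graph f := by
      funext n w; exact ih n w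
    simp only [goC, dfsGoA, foldC_fst, hr]

-- the step counter is additive in its starting value
theorem foldC_cost_add (r : Int → PySem.Dict Int Bool → (Int × PySem.Dict Int Bool) × Nat)
    (l : List (Int × Int)) (mv : Int × PySem.Dict Int Bool) (c : Nat) :
    l.foldl (stepC r) (mv, c)
      = ((l.foldl (stepC r) (mv, 0)).1, c + (l.foldl (stepC r) (mv, 0)).2) := by
  induction l generalizing mv c with
  | nil => simp
  | cons p t ih =>
    simp only [List.foldl_cons, stepC]
    by_cases h : mv.2.getD p.1 true
    · simp only [h, if_true]
      rw [ih mv (c + 1), ih mv (0 + 1)]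
      simp only [Prod.mk.injEq, true_and]
      omega
    · simp only [h, Bool.false_eq_true, if_false]
      rw [ih _ (c + 1 + (r p.1 mv.2).2), ih _ (0 + 1 + (r p.1 mv.2).2)]
      simp only [Prod.mk.injEq, true_and]
      omega

-- marking a key True can only lower the number of False entries
theorem countP_map_le (l : List (Int × Bool)) (k : Int) :
    (l.map (fun p => if p.1 == k then (k, true) else p)).countP (fun p => p.2 == false)
      ≤ l.countP (fun p => p.2 == false) := by
  rw [List.countP_map]
  apply List.countP_mono_left
  intro x _ hx
  by_cases hk : (x.1 == k) = true
  · simp [Function.comp, hk] at hx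
  · simpa [Function.comp, hk] using hx

theorem cf_insert_le (v : PySem.Dict Int Bool) (k : Int) : cf (v.insert k true) ≤ cf v := by
  unfold cf PySem.Dict.insert
  by_cases h : v.contains k = true
  · simp only [h, if_true]
    exact countP_map_le v.items k
  · simp [h, List.countP_append]

-- a dict lookup returning False means a False entry is found first
theorem getD_false_find? (v : PySem.Dict Int Bool) (k : Int) (h : v.getD k true = false) :
    ∃ p0, v.items.find? (fun p => p.1 == k) = some p0 ∧ p0.2 = false := by
  unfold PySem.Dict.getD PySem.Dict.get? at h
  cases hf : v.items.find? (fun p => p.1 == k) with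
  | none => rw [hf] at h; simp at h
  | some p0 => rw [hf] at h; simp at h; exact ⟨p0, rfl, h⟩

theorem countP_map_lt (l : List (Int × Bool)) (k : Int) (p0 : Int × Bool)
    (hf : l.find? (fun p => p.1 == k) = some p0) (h0 : p0.2 = false) :
    (l.map (fun p => if p.1 == k then (k, true) else p)).countP (fun p => p.2 == false)
      < l.countP (fun p => p.2 == false) := by
  induction l with
  | nil => simp at hf
  | cons a t ih =>
    by_cases ha : (a.1 == k) = true
    · rw [List.find?_cons] at hf
      simp only [ha, Option.some.injEq] at hf
      have ha2 : a.2 = false := by rw [hf]; exact h0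
      simp only [List.map_cons, ha, if_true, List.countP_cons, ha2]
      have := countP_map_le t k
      simp only [show ((true : Bool) == false) = false from rfl, Bool.false_eq_true, if_false,
        beq_self_eq_true, if_true]
      omega
    · rw [List.find?_cons] at hf
      simp only [ha] at hf
      simp only [List.map_cons, ha, List.countP_cons]
      exact Nat.add_lt_add_right (ih hf) _

theorem cf_insert_lt (v : PySem.Dict Int Bool) (k : Int) (h : v.getD k true = false) :
    cf (v.insert k true) < cf v := by
  obtain ⟨p0, hf, h0⟩ := getD_false_find? v k h
  have hc : v.contains k = true := by
    unfold PySem.Dict.contains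
    exact List.any_eq_true.mpr ⟨p0, List.mem_of_find?_eq_some hf, by simpa using List.find?_some hf⟩
  unfold cf PySem.Dict.insert
  simp only [hc, if_true]
  exact countP_map_lt v.items k p0 hf h0

theorem cf_pos (v : PySem.Dict Int Bool) (k : Int) (h : v.getD k true = false) : 0 < cf v := by
  obtain ⟨p0, hf, h0⟩ := getD_false_find? v k h
  unfold cf
  rw [List.countP_pos_iff]
  exact ⟨p0, List.mem_of_find?_eq_some hf, by simp [h0]⟩

theorem foldC_cf_le (r : Int → PySem.Dict Int Bool → (Int × PySem.Dict Int Bool) × Nat)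
    (hr : ∀ n w, cf ((r n w).1.2) ≤ cf w) (l : List (Int × Int)) (m : Int)
    (v : PySem.Dict Int Bool) (c : Nat) :
    cf ((l.foldl (stepC r) ((m, v), c)).1.2) ≤ cf v := by
  induction l generalizing m v c with
  | nil => exact Nat.le_refl _
  | cons p t ih =>
    simp only [List.foldl_cons, stepC]
    by_cases h : v.getD p.1 true
    · simp only [h, if_true]
      exact ih m v (c + 1)
    · simp only [h, Bool.false_eq_true, if_false]
      exact Nat.le_trans (ih _ _ _) (hr p.1 v)

theorem cf_goC_le (graph : PySem.Dict Int (List (Int × Int))) (f : Nat) (u : Int)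
    (v : PySem.Dict Int Bool) : cf (goC graph f u v).1.2 ≤ cf v := by
  induction f generalizing u v with
  | zero => exact Nat.le_refl _
  | succ f ih =>
    simp only [goC]
    exact Nat.le_trans (foldC_cf_le (goC graph f) ih _ 0 _ 0) (cf_insert_le v u)

-- every adjacency list in the graph dict is at most adjSum long
theorem adj_len_le (graph : List (Int × List (Int × Int))) (u : Int) :
    (((PySem.Dict.mk graph).get? u).getD []).length ≤ adjSum graph := by
  unfold PySem.Dict.get?
  cases hf : graph.find? (fun p => p.1 == u) with
  | none => simp [adjSum]
  | some q0 =>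
    simp only [Option.map_some, Option.getD_some]
    unfold adjSum
    rw [PySem.List.foldl_add_nat]
    have hm : q0.2.length ∈ graph.map (fun p => p.2.length) :=
      List.mem_map_of_mem (List.mem_of_find?_eq_some hf)
    have := List.single_le_sum (l := graph.map (fun p => p.2.length))
      (fun x _ => Nat.zero_le x) _ hm
    omega

theorem foldC_cost_le (r : Int → PySem.Dict Int Bool → (Int × PySem.Dict Int Bool) × Nat)
    (G : Nat) (hr : ∀ n w, (r n w).2 ≤ G) (l : List (Int × Int)) (m : Int)
    (v : PySem.Dict Int Bool) :
    (l.foldl (stepC r) ((m, v), 0)).2 ≤ l.length * (G + 1) := by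
  induction l generalizing m v with
  | nil => simp
  | cons p t ih =>
    simp only [List.foldl_cons, stepC, List.length_cons, Nat.succ_mul]
    by_cases h : v.getD p.1 true
    · simp only [h, if_true]
      rw [foldC_cost_add]
      have := ih m v
      omega
    · simp only [h, Bool.false_eq_true, if_false]
      rw [foldC_cost_add]
      have h1 := ih (if (r p.1 v).1.1 + p.2 > m then (r p.1 v).1.1 + p.2 else m) ((r p.1 v).1.2)
      have h2 := hr p.1 v
      omega

theorem goC_cost_le (graph : List (Int × List (Int × Int))) (f : Nat) (u : Int)
    (v : PySem.Dict Int Bool) :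
    (goC (PySem.Dict.mk graph) f u v).2 ≤ fuelB (adjSum graph) f := by
  induction f generalizing u v with
  | zero => exact Nat.le_refl _
  | succ f ih =>
    simp only [goC, fuelB]
    have h1 := foldC_cost_le (goC (PySem.Dict.mk graph) f) (fuelB (adjSum graph) f)
      (fun n w => ih n w) (((PySem.Dict.mk graph).get? u).getD []) 0 (v.insert u true)
    have h2 := adj_len_le graph u
    have h3 := Nat.mul_le_mul_right (fuelB (adjSum graph) f + 1) h2
    omega

-- MAIN LEMMA: one finished frame of the machine = one instrumented fold of A's loop
theorem runB_frame (d : PySem.Dict Int (List (Int × Int))) :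
    ∀ (f : Nat) (u : Int) (rest : List (Int × Int)) (i : Nat) (m w : Int)
      (S : List (Int × Nat × Int × Int)) (v : PySem.Dict Int Bool) (fB : Nat),
      ((d.get? u).getD []).drop i = rest →
      cf v ≤ f →
      runB d ((rest.foldl (stepC (goC d f)) ((m, v), 0)).2 + 1 + fB) ((u, i, m, w) :: S) v
        = contPop d fB S ((rest.foldl (stepC (goC d f)) ((m, v), 0)).1.1 + w)
            ((rest.foldl (stepC (goC d f)) ((m, v), 0)).1.2) := by
  intro f
  induction f with
  | zero =>
    intro u rest
    induction rest with
    | nil =>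
      intro i m w S v fB hrest hcf
      have hnone : ((d.get? u).getD [])[i]? = none := by
        rw [← List.head?_drop, hrest]; rfl
      simp only [List.foldl_nil]
      rw [show (0 : Nat) + 1 + fB = fB + 1 from by omega]
      cases S with
      | nil => simp [runB, hnone, contPop]
      | cons fr S' =>
        obtain ⟨pu, pi, pm, pw⟩ := fr
        simp [runB, hnone, contPop]
    | cons p rest' ihr =>
      intro i m w S v fB hrest hcf
      have hsome : ((d.get? u).getD [])[i]? = some p := by
        rw [← List.head?_drop, hrest]; rfl
      have hdrop' : ((d.get? u).getD []).drop (i + 1) = rest' := by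
        rw [← List.tail_drop, hrest]; rfl
      by_cases hv : v.getD p.1 true
      · simp only [List.foldl_cons, stepC, hv, if_true]
        rw [foldC_cost_add]
        dsimp only
        rw [show 0 + 1 + (rest'.foldl (stepC (goC d 0)) ((m, v), 0)).2 + 1 + fB
              = ((rest'.foldl (stepC (goC d 0)) ((m, v), 0)).2 + 1 + fB) + 1 from by omega]
        simp only [runB, hsome, hv, if_true]
        exact ihr (i + 1) m w S v fB hdrop' hcf
      · exfalso
        have h1 := cf_pos v p.1 (by revert hv; cases v.getD p.1 true <;> simp)
        omega
  | succ f ihf =>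
    intro u rest
    induction rest with
    | nil =>
      intro i m w S v fB hrest hcf
      have hnone : ((d.get? u).getD [])[i]? = none := by
        rw [← List.head?_drop, hrest]; rfl
      simp only [List.foldl_nil]
      rw [show (0 : Nat) + 1 + fB = fB + 1 from by omega]
      cases S with
      | nil => simp [runB, hnone, contPop]
      | cons fr S' =>
        obtain ⟨pu, pi, pm, pw⟩ := fr
        simp [runB, hnone, contPop]
    | cons p rest' ihr =>
      intro i m w S v fB hrest hcf
      have hsome : ((d.get? u).getD [])[i]? = some p := by
        rw [← List.head?_drop, hrest]; rfl
      have hdrop' : ((d.get? u).getD []).drop (i + 1) = rest' := by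
        rw [← List.tail_drop, hrest]; rfl
      by_cases hv : v.getD p.1 true
      · simp only [List.foldl_cons, stepC, hv, if_true]
        rw [foldC_cost_add]
        dsimp only
        rw [show 0 + 1 + (rest'.foldl (stepC (goC d (f + 1))) ((m, v), 0)).2 + 1 + fB
              = ((rest'.foldl (stepC (goC d (f + 1))) ((m, v), 0)).2 + 1 + fB) + 1 from by omega]
        simp only [runB, hsome, hv, if_true]
        exact ihr (i + 1) m w S v fB hdrop' hcf
      · have hvf : v.getD p.1 true = false := by revert hv; cases v.getD p.1 true <;> simp
        have hcf' : cf (v.insert p.1 true) ≤ f := by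
          have := cf_insert_lt v p.1 hvf
          omega
        have hcfb : cf ((((d.get? p.1).getD []).foldl (stepC (goC d f))
            ((0, v.insert p.1 true), 0)).1.2) ≤ f + 1 :=
          Nat.le_trans (Nat.le_trans
            (foldC_cf_le (goC d f) (fun n w => cf_goC_le d f n w)
              ((d.get? p.1).getD []) 0 (v.insert p.1 true) 0)
            (cf_insert_le v p.1)) hcf
        simp only [List.foldl_cons, stepC, hvf, Bool.false_eq_true, if_false]
        rw [goC]
        dsimp only
        rw [foldC_cost_add]
        dsimp only
        generalize hcfold : ((d.get? p.1).getD []).foldl (stepC (goC d f))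
          ((0, v.insert p.1 true), 0) = cfold
        rw [hcfold] at hcfb
        generalize hm' : (if cfold.1.1 + p.2 > m then cfold.1.1 + p.2 else m) = m'
        generalize hq : rest'.foldl (stepC (goC d (f + 1))) ((m', cfold.1.2), 0) = q
        rw [show 0 + 1 + (cfold.2 + 1) + q.2 + 1 + fB
              = (cfold.2 + 1 + (q.2 + 1 + fB)) + 1 from by omega]
        simp only [runB, hsome, hvf, Bool.false_eq_true, if_false]
        have hchild := ihf p.1 ((d.get? p.1).getD []) 0 0 p.2 ((u, i + 1, m, w) :: S)
          (v.insert p.1 true) (q.2 + 1 + fB) List.drop_zero hcf'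
        rw [hcfold] at hchild
        rw [hchild]
        simp only [contPop]
        rw [hm']
        have htail := ihr (i + 1) m' w S cfold.1.2 fB hdrop' hcfb
        rw [hq] at htail
        exact htail

theorem dfs_eq_alt (graph : List (Int × List (Int × Int))) (node : Int)
    (visited : List (Int × Bool)) : dfs graph node visited = dfs_alt graph node visited := by
  unfold dfs dfs_alt
  rw [dfsGoA]
  have hev : (fun nd w => (goC (PySem.Dict.mk graph) visited.length nd w).1)
      = dfsGoA (PySem.Dict.mk graph) visited.length :=
    funext fun nd => funext fun w => goC_fst _ _ nd w
  rw [← hev, ← foldC_fst (goC (PySem.Dict.mk graph) visited.length)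
    (((PySem.Dict.mk graph).get? node).getD []) 0 ((PySem.Dict.mk visited).insert node true) 0]
  have hcf1 : cf ((PySem.Dict.mk visited).insert node true) ≤ visited.length := by
    have h1 := cf_insert_le (PySem.Dict.mk visited) node
    have h2 : cf (PySem.Dict.mk visited) ≤ visited.length := List.countP_le_length
    omega
  have hcost : ((((PySem.Dict.mk graph).get? node).getD []).foldl
      (stepC (goC (PySem.Dict.mk graph) visited.length))
      ((0, (PySem.Dict.mk visited).insert node true), 0)).2 + 1
        ≤ fuelB (adjSum graph) (visited.length + 1) := by
    have h1 := foldC_cost_le (goC (PySem.Dict.mk graph) visited.length)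
      (fuelB (adjSum graph) visited.length)
      (fun nd w => goC_cost_le graph visited.length nd w)
      (((PySem.Dict.mk graph).get? node).getD []) 0 ((PySem.Dict.mk visited).insert node true)
    have h2 := adj_len_le graph node
    have h3 := Nat.mul_le_mul_right (fuelB (adjSum graph) visited.length + 1) h2
    simp only [fuelB]
    omega
  obtain ⟨fB, hfB⟩ : ∃ fB, fuelB (adjSum graph) (visited.length + 1)
      = ((((PySem.Dict.mk graph).get? node).getD []).foldl
          (stepC (goC (PySem.Dict.mk graph) visited.length))
          ((0, (PySem.Dict.mk visited).insert node true), 0)).2 + 1 + fB :=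
    ⟨_, (Nat.add_sub_cancel' hcost).symm⟩
  rw [hfB]
  rw [runB_frame (PySem.Dict.mk graph) visited.length node
    (((PySem.Dict.mk graph).get? node).getD []) 0 0 0 []
    ((PySem.Dict.mk visited).insert node true) fB List.drop_zero hcf1]
  simp [contPop]

-- ===== VERDICT (by name: the statement is the Claim_ definition above) =====
theorem dfs_spec : Claim_equal_dfs := by
  intro graph node visited _ _
  unfold Spec_dfs
  exact dfs_eq_alt graph node visited
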